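-- pv_equiv track=rewrite | github.com/nymwa/ilonimi | ilonimi/modules/joiner.py | __call__
-- ===== SOURCE A (Python) =====
-- def __call__(x):
--     x = x.split()
--
--     merged = x[0]
--     for i in range(len(x) - 1):
--         if x[i].isupper() and x[i+1].isupper():
--             pass
--         elif x[i].isnumeric() and x[i+1].isnumeric():
--             pass
--         else:
--             merged += ' '
--         merged += x[i+1]
--     return merged
-- ===== SOURCE B (Python) =====
-- from itertools import groupby
--
-- def __call__(x):
--     def kind(t):
--         if t.isupper():
--             return 'upper'
--         if t.isnumeric():
--             return 'numeric'
--         return 'other'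
--     runs = [('' if k != 'other' else ' ').join(g) for k, g in groupby(x.split(), key=kind)]
--     return ' '.join(runs)
-- ===== Notes on version B (the rewrite author's own statement) =====
-- stated objective: alternative
-- what changed: B replaces A's pairwise index loop with repeated string concatenation by grouping the tokens into maximal same-kind runs (itertools.groupby on an upper/numeric/other key) and joining each run, then joining the runs with spaces; Pre_ excludes empty/whitespace-only inputs, on which A raises IndexError.
-- outside the precondition, e.g. on __call__(''): A raises IndexError, B returns ''
-- crash fix: On empty or whitespace-only input A raises IndexError (x[0] on an empty token list) while B returns the empty string. — e.g. on __call__(" "): A raises IndexError, B returns ""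
import Mathlib
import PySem

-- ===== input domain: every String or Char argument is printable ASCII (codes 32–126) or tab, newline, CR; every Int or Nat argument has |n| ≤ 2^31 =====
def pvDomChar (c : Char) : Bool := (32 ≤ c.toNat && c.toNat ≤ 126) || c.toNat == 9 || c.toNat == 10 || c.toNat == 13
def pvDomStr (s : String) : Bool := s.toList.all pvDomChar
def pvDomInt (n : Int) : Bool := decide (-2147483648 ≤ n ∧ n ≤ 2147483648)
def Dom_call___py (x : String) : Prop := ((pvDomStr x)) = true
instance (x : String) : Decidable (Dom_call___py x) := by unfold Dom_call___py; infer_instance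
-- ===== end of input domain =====

-- B rejoins the tokens by grouping maximal runs of same-kind (upper/numeric) tokens (itertools.groupby)
-- and joining per run, instead of A's pairwise loop with repeated string concatenation (objective: alternative).


-- ===== PORT A =====
-- str.isupper(): at least one cased character and no lowercase one — exact on the ASCII domain,
-- where the cased characters are exactly 'A'-'Z' and 'a'-'z'.
def pyIsupper (t : String) : Bool :=
  t.toList.any PySem.Chars.isupper && t.toList.all (fun c => !PySem.Chars.islower c)

-- str.isnumeric(): on the ASCII domain the only numeric characters are the digits '0'-'9',
-- so isnumeric coincides with isdigit there.
def pyIsnumeric (t : String) : Bool := PySem.Str.strIsdigit t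

def call___py (x : String) : String :=
  let xs := PySem.Str.split₀ x
  let merged := (PySem.List.pyGet? xs 0).getD ""   -- x[0]; none = IndexError, excluded by Pre_
  (PySem.List.pyRange 0 ((xs.length : Int) - 1) 1).foldl
    (fun merged i =>
      let a := PySem.List.pyGetD xs i ""
      let b := PySem.List.pyGetD xs (i + 1) ""
      let merged :=
        if pyIsupper a && pyIsupper b then merged
        else if pyIsnumeric a && pyIsnumeric b then merged
        else merged ++ " "
      merged ++ b)
    merged

-- ===== PORT B =====
def kindOf (t : String) : String :=
  if pyIsupper t then "upper" else if pyIsnumeric t then "numeric" else "other"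

-- itertools.groupby(toks, key=kindOf): maximal runs of consecutive tokens with equal key
def groupRuns : List String → List (String × List String)
  | [] => []
  | t :: ts =>
    match groupRuns ts with
    | [] => [(kindOf t, [t])]
    | (k, g) :: rest =>
      if kindOf t = k then (kindOf t, t :: g) :: rest
      else (kindOf t, [t]) :: (k, g) :: rest

def call___py_alt (x : String) : String :=
  PySem.Str.join " "
    ((groupRuns (PySem.Str.split₀ x)).map (fun kg =>
      PySem.Str.join (if kg.1 = "other" then " " else "") kg.2))

-- ===== PRECONDITION & SPEC =====
-- Pre_ excludes exactly the inputs with no tokens (empty / all-whitespace), on which A raises IndexError.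
def Pre_call___py (x : String) : Prop := PySem.Str.split₀ x ≠ []
instance (x : String) : Decidable (Pre_call___py x) := by unfold Pre_call___py; infer_instance
def pvWitness_call___py : String := "AB CD 12 34 toki pona A 1"

-- On empty or whitespace-only input A raises IndexError (x[0] on an empty token list) while B returns "".
def Raises_call___py (x : String) : Prop := PySem.Str.split₀ x = []
instance (x : String) : Decidable (Raises_call___py x) := by unfold Raises_call___py; infer_instance
def pvRaiseWitness_call___py : String := " "
def pvRaiseWitnessOut_call___py : String := ""

def Spec_call___py (x : String) (out : String) : Prop := out = call___py_alt x
instance (x : String) (out : String) : Decidable (Spec_call___py x out) := by unfold Spec_call___py; infer_instance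

-- ===== CLAIM (what is proved, stated in full; the proofs are below) =====
def Claim_equal_call___py : Prop := ∀ (x : String), Dom_call___py x → Pre_call___py x → Spec_call___py x (call___py x)
def Claim_raises_call___py : Prop := (∀ (x : String), Dom_call___py x → Raises_call___py x → ¬ Pre_call___py x) ∧ (Dom_call___py (pvRaiseWitness_call___py) ∧ Raises_call___py (pvRaiseWitness_call___py) ∧ call___py_alt (pvRaiseWitness_call___py) = pvRaiseWitnessOut_call___py)

-- ===== LEMMAS AND PROOFS =====

-- A's separator between adjacent tokens, and the piece it appends per pair
def sepAB (a b : String) : String :=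
  if pyIsupper a && pyIsupper b then ""
  else if pyIsnumeric a && pyIsnumeric b then "" else " "
def pieceAB (p : String × String) : String := sepAB p.1 p.2 ++ p.2

def catList : List String → String
  | [] => ""
  | s :: r => s ++ catList r

lemma stepA_eq (m a b : String) :
    (if pyIsupper a && pyIsupper b then m
     else if pyIsnumeric a && pyIsnumeric b then m
     else m ++ " ") ++ b = m ++ pieceAB (a, b) := by
  simp only [pieceAB, sepAB]
  split_ifs <;> simp [String.append_assoc, String.empty_append]

-- pulling the pieces out of A's left fold
lemma foldPairs_eq : ∀ (l : List (String × String)) (m0 : String),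
    l.foldl
      (fun m p =>
        (if pyIsupper p.1 && pyIsupper p.2 then m
         else if pyIsnumeric p.1 && pyIsnumeric p.2 then m
         else m ++ " ") ++ p.2) m0
    = m0 ++ catList (l.map pieceAB)
  | [], m0 => by simp [catList, String.append_empty]
  | p :: l, m0 => by
    simp only [List.foldl_cons, List.map_cons, catList]
    rw [foldPairs_eq l, stepA_eq]
    rw [String.append_assoc]

-- the index loop over range(len(xs)-1) visits exactly the adjacent pairs zip xs xs.tail
lemma rangeFold_eq_zipFold (f : String → String → String → String) (d : String) :
    ∀ (xs : List String) (m0 : String),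
      (List.range (xs.length - 1)).foldl
        (fun m k => f m (xs.getD k d) (xs.getD (k + 1) d)) m0
      = (xs.zip xs.tail).foldl (fun m p => f m p.1 p.2) m0
  | [], m0 => by simp
  | [a], m0 => by simp
  | a :: b :: zs, m0 => by
    have h1 : (a :: b :: zs).length - 1 = zs.length + 1 := by simp
    rw [h1, List.range_succ_eq_map, List.foldl_cons, List.foldl_map]
    simp only [List.getD_cons_zero, List.getD_cons_succ]
    have h2 : (b :: zs).length - 1 = zs.length := by simp
    have := rangeFold_eq_zipFold f d (b :: zs) (f m0 a b)
    rw [h2] at this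
    simpa [List.zip] using this

-- A's whole loop, in closed cat-of-pieces form
lemma foldA_eq (xs : List String) (m0 : String) :
    (PySem.List.pyRange 0 ((xs.length : Int) - 1) 1).foldl
      (fun merged i =>
        let a := PySem.List.pyGetD xs i ""
        let b := PySem.List.pyGetD xs (i + 1) ""
        let merged :=
          if pyIsupper a && pyIsupper b then merged
          else if pyIsnumeric a && pyIsnumeric b then merged
          else merged ++ " "
        merged ++ b)
      m0
    = m0 ++ catList ((xs.zip xs.tail).map pieceAB) := by
  rw [PySem.List.pyRange_one]
  have h2 : (((xs.length : Int) - 1) - 0).toNat = xs.length - 1 := by omega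
  rw [h2, List.foldl_map]
  have h3 : ∀ (k : Nat), ((k : Int) + 1) = (((k + 1 : Nat)) : Int) := by intro k; push_cast; ring
  simp only [zero_add, h3, PySem.List.pyGetD_natCast]
  rw [rangeFold_eq_zipFold
        (fun m a b =>
          (if pyIsupper a && pyIsupper b then m
           else if pyIsnumeric a && pyIsnumeric b then m
           else m ++ " ") ++ b) "" xs m0]
  exact foldPairs_eq (xs.zip xs.tail) m0

-- an ASCII uppercase letter is not a digit
lemma up_not_digit (c : Char) : PySem.Chars.isupper c = true → PySem.Chars.isdigit c = false := by
  intro h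
  rcases (by simpa [PySem.Chars.isupper] using h : 'A' ≤ c ∧ c ≤ 'Z') with ⟨h1, _⟩
  by_contra hne
  have hd : PySem.Chars.isdigit c = true := by
    cases hdv : PySem.Chars.isdigit c
    · exact absurd hdv hne
    · rfl
  rcases (by simpa [PySem.Chars.isdigit] using hd : '0' ≤ c ∧ c ≤ '9') with ⟨_, h4⟩
  exact absurd (le_trans h1 h4) (by decide)

-- a token cannot be both isupper() and isnumeric()
lemma disj (t : String) : pyIsupper t = true → pyIsnumeric t = false := by
  intro h
  rcases (Bool.and_eq_true _ _).mp h with ⟨hany, _⟩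
  rcases List.any_eq_true.mp hany with ⟨c, hc, hcu⟩
  cases hv : pyIsnumeric t
  · rfl
  · exfalso
    have hall : t.toList.all PySem.Chars.isdigit = true := by
      have := hv
      simp only [pyIsnumeric, PySem.Str.strIsdigit_eq, PySem.Chars.strIsdigit,
        Bool.and_eq_true] at this
      exact this.2
    have := List.all_eq_true.mp hall c hc
    rw [up_not_digit c hcu] at this
    exact Bool.false_ne_true this

lemma sep_eq_of_kind_eq (t b : String) (h : kindOf t = kindOf b) :
    sepAB t b = (if kindOf t = "other" then " " else "") := by
  have d1 := disj t
  have d2 := disj b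
  unfold kindOf at h ⊢
  unfold sepAB
  cases hu : pyIsupper t <;> cases hub : pyIsupper b <;>
    cases hn : pyIsnumeric t <;> cases hnb : pyIsnumeric b <;>
    simp_all

lemma sep_eq_of_kind_ne (t b : String) (h : kindOf t ≠ kindOf b) :
    sepAB t b = " " := by
  have d1 := disj t
  have d2 := disj b
  unfold kindOf at h
  unfold sepAB
  cases hu : pyIsupper t <;> cases hub : pyIsupper b <;>
    cases hn : pyIsnumeric t <;> cases hnb : pyIsnumeric b <;>
    simp_all

-- the head group of groupby of a nonempty list starts with the head token and carries its key
lemma head_groupRuns (ts : List String) (b : String) :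
    ∃ g r, groupRuns (b :: ts) = (kindOf b, b :: g) :: r := by
  cases h : groupRuns ts with
  | nil => exact ⟨[], [], by simp [groupRuns, h]⟩
  | cons kg rest =>
    obtain ⟨k, g⟩ := kg
    by_cases hk : kindOf b = k
    · exact ⟨g, rest, by simp [groupRuns, h, hk]⟩
    · exact ⟨[], (k, g) :: rest, by simp [groupRuns, h, hk]⟩

-- String-level join helpers
lemma join_single (sep s : String) : PySem.Str.join sep [s] = s := by
  apply String.toList_inj.mp
  simp [PySem.Str.toList_join, PySem.Chars.join_singleton]

lemma join_cons2 (sep a b : String) (l : List String) :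
    PySem.Str.join sep (a :: b :: l) = a ++ sep ++ PySem.Str.join sep (b :: l) := by
  apply String.toList_inj.mp
  simp [PySem.Str.toList_join, PySem.Chars.join_cons_cons, String.toList_append]

lemma join_cons_append (sep p y : String) (l : List String) :
    PySem.Str.join sep ((p ++ y) :: l) = p ++ PySem.Str.join sep (y :: l) := by
  cases l with
  | nil => rw [join_single, join_single]
  | cons q l => rw [join_cons2, join_cons2]; simp [String.append_assoc]

def jg (kg : String × List String) : String :=
  PySem.Str.join (if kg.1 = "other" then " " else "") kg.2
def Bcore (l : List String) : String := PySem.Str.join " " ((groupRuns l).map jg)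

-- B's grouped join equals head-token ++ A's cat of pieces
lemma Bcore_eq : ∀ (ts : List String) (t : String),
    Bcore (t :: ts) = t ++ catList (((t :: ts).zip ts).map pieceAB)
  | [], t => by
    simp [Bcore, groupRuns, jg, join_single, catList, String.append_empty]
  | b :: ts', t => by
    obtain ⟨g, r, hgr⟩ := head_groupRuns ts' b
    have ih := Bcore_eq ts' b
    rw [show ((t :: b :: ts').zip (b :: ts')) = (t, b) :: ((b :: ts').zip ts') from rfl]
    simp only [List.map_cons, catList, pieceAB]
    by_cases hk : kindOf t = kindOf b
    · have e : groupRuns (t :: b :: ts') =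
          (match groupRuns (b :: ts') with
           | [] => [(kindOf t, [t])]
           | (k, g) :: rest =>
             if kindOf t = k then (kindOf t, t :: g) :: rest
             else (kindOf t, [t]) :: (k, g) :: rest) := rfl
      have hgr2 : groupRuns (t :: b :: ts') = (kindOf t, t :: b :: g) :: r := by
        rw [e, hgr]; simp [hk]
      have hsep := sep_eq_of_kind_eq t b hk
      unfold Bcore at ih ⊢
      rw [hgr] at ih
      rw [hgr2]
      simp only [List.map_cons] at ih ⊢
      rw [show jg (kindOf t, t :: b :: g)
            = (t ++ (if kindOf t = "other" then " " else ""))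
              ++ PySem.Str.join (if kindOf t = "other" then " " else "") (b :: g) from
          join_cons2 _ t b g]
      rw [join_cons_append]
      have hjb : jg (kindOf b, b :: g)
          = PySem.Str.join (if kindOf t = "other" then " " else "") (b :: g) := by
        unfold jg; rw [hk]
      rw [← hjb, ih, hsep]
      simp [String.append_assoc]
    · have e : groupRuns (t :: b :: ts') =
          (match groupRuns (b :: ts') with
           | [] => [(kindOf t, [t])]
           | (k, g) :: rest =>
             if kindOf t = k then (kindOf t, t :: g) :: rest
             else (kindOf t, [t]) :: (k, g) :: rest) := rfl
      have hgr2 : groupRuns (t :: b :: ts') = (kindOf t, [t]) :: (kindOf b, b :: g) :: r := by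
        rw [e, hgr]; simp [hk]
      have hsep := sep_eq_of_kind_ne t b hk
      unfold Bcore at ih ⊢
      rw [hgr] at ih
      rw [hgr2]
      simp only [List.map_cons] at ih ⊢
      rw [join_cons2, show jg (kindOf t, [t]) = t from join_single _ t]
      rw [ih, hsep]
      simp [String.append_assoc]

-- ===== VERDICT (by name: the statement is the Claim_ definition above) =====
theorem call___py_spec : Claim_equal_call___py := by
  intro x _ hpre
  unfold Spec_call___py
  rcases hsp : PySem.Str.split₀ x with _ | ⟨t, ts⟩
  · exact absurd hsp hpre
  · have hinit : (PySem.List.pyGet? (t :: ts) 0).getD "" = t := by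
      simp [PySem.List.pyGet?, PySem.List.pyIdx?]
    unfold call___py call___py_alt
    rw [hsp]
    simp only [hinit]
    rw [foldA_eq (t :: ts) t]
    have hb := Bcore_eq ts t
    unfold Bcore at hb
    exact hb.symm

theorem call___py_raises : Claim_raises_call___py := by
  unfold Claim_raises_call___py
  exact ⟨fun x _ hr hp => hp hr, by decide⟩

-- self-check: the raise witness really lies inside Raises_ and B returns the stated literal there
theorem pvRaiseWitness_ok : Raises_call___py pvRaiseWitness_call___py ∧
    call___py_alt pvRaiseWitness_call___py = pvRaiseWitnessOut_call___py :=
  call___py_raises.2.2
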